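-- pv_equiv track=rewrite | github.com/LZhengg324/LeetCode | Python/_3132_minimumAddedInteger.py | minimumAddedInteger
-- ===== SOURCE A (Python) =====
-- from typing import List
--
-- def minimumAddedInteger(nums1: List[int], nums2: List[int]) -> int:
--     nums1.sort()
--     nums2.sort()
--     for i in range(2, 0, -1):
--         x = nums2[0] - nums1[i]
--         j = 0
--         for v in nums1[i : ]:
--             if nums2[j] == x + v:
--                 j += 1
--                 if j == len(nums2):
--                     return x
--     return nums2[0] - nums1[0]
-- ===== SOURCE B (Python) =====
-- from typing import List
--
-- # Same return value as A; like A it sorts both lists in place.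
-- # Replaces A's two-pointer greedy subsequence scan with a destructive
-- # multiset check: try to remove each shifted nums2 value from a pool of
-- # the nums1 tail (valid because for sorted lists, being a subsequence is
-- # the same as multiset containment). The candidate loop is unrolled.
-- def _fits(x: int, nums2: List[int], tail: List[int]) -> bool:
--     pool = list(tail)
--     for v in nums2:
--         try:
--             pool.remove(v - x)
--         except ValueError:
--             return False
--     return True
--
-- def minimumAddedInteger(nums1: List[int], nums2: List[int]) -> int:
--     nums1.sort()
--     nums2.sort()
--     x = nums2[0] - nums1[2]
--     if _fits(x, nums2, nums1[2:]):
--         return x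
--     x = nums2[0] - nums1[1]
--     if _fits(x, nums2, nums1[1:]):
--         return x
--     return nums2[0] - nums1[0]
-- ===== Notes on version B (the rewrite author's own statement) =====
-- stated objective: alternative
-- what changed: A's two-pointer greedy subsequence scan over nums1[i:] is replaced by a destructive multiset check that removes each shifted nums2 value from a pool copied from the nums1 tail (valid because both lists are sorted), with the two candidate offsets unrolled instead of looped over range(2,0,-1).
import Mathlib
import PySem

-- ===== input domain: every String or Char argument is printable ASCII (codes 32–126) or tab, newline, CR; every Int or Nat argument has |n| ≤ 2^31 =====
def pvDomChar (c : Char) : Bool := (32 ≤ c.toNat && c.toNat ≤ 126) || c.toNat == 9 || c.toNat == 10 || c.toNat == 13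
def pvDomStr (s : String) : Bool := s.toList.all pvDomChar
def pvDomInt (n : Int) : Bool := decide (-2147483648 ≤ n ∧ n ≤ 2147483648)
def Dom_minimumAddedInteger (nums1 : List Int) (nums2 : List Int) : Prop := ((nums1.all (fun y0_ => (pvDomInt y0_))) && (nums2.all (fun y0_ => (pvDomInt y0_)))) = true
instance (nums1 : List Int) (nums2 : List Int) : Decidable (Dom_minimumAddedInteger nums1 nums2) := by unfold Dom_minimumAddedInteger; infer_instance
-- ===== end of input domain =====

-- B replaces A's two-pointer greedy subsequence scan with a destructive multiset
-- check (remove each shifted nums2 value from a pool of the nums1 tail) and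
-- unrolls the candidate loop; same return value. Both A and B sort the two
-- argument lists in place (identical side effect); the theorems are about the
-- return value.

-- ===== PORT A =====
-- inner loop: j is the two-pointer index into nums2; 'nums2[j]' is in range
-- whenever Python reaches it (guarded by the 'j == len(nums2): return' check),
-- so pyGetD is exact here under Pre_.
def aMatch (x : Int) (s2 : List Int) (tail : List Int) (j : Nat) : Bool :=
  match tail with
  | [] => false
  | v :: rest =>
    if PySem.List.pyGetD s2 (j : Int) 0 = x + v then
      if j + 1 = s2.length then true else aMatch x s2 rest (j + 1)
    else aMatch x s2 rest j

-- outer loop over range(2, 0, -1) = [2, 1], with early return;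
-- nums1[i:] for a nonnegative i is List.drop i (exact).
def aTry (s1 s2 : List Int) : List Nat → Int
  | [] => PySem.List.pyGetD s2 0 0 - PySem.List.pyGetD s1 0 0
  | i :: is =>
    let x := PySem.List.pyGetD s2 0 0 - PySem.List.pyGetD s1 (i : Int) 0
    if aMatch x s2 (s1.drop i) 0 then x else aTry s1 s2 is

def minimumAddedInteger (nums1 : List Int) (nums2 : List Int) : Int :=
  aTry (PySem.List.sorted nums1 (fun v => v) false)
       (PySem.List.sorted nums2 (fun v => v) false) [2, 1]

-- ===== PORT B =====
-- '_fits': for v in nums2, pool.remove(v - x) (first occurrence; ValueError →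
-- False) is PySem.List.remove?; 'pool = list(tail)' is the pool argument itself.
def bFits (x : Int) (s2 : List Int) (pool : List Int) : Bool :=
  match s2 with
  | [] => true
  | v :: rest =>
    match PySem.List.remove? pool (v - x) with
    | none => false
    | some p => bFits x rest p

def minimumAddedInteger_alt (nums1 : List Int) (nums2 : List Int) : Int :=
  let s1 := PySem.List.sorted nums1 (fun v => v) false
  let s2 := PySem.List.sorted nums2 (fun v => v) false
  let x2 := PySem.List.pyGetD s2 0 0 - PySem.List.pyGetD s1 2 0
  if bFits x2 s2 (s1.drop 2) then x2
  else
    let x1 := PySem.List.pyGetD s2 0 0 - PySem.List.pyGetD s1 1 0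
    if bFits x1 s2 (s1.drop 1) then x1
    else PySem.List.pyGetD s2 0 0 - PySem.List.pyGetD s1 0 0

-- ===== PRECONDITION & SPEC =====
-- Pre_ excludes exactly the inputs on which Python A raises IndexError
-- (nums1[2] needs at least 3 elements, nums2[0] needs a nonempty nums2);
-- B raises there too.
def Pre_minimumAddedInteger (nums1 : List Int) (nums2 : List Int) : Prop :=
  3 ≤ nums1.length ∧ nums2 ≠ []
instance (nums1 : List Int) (nums2 : List Int) : Decidable (Pre_minimumAddedInteger nums1 nums2) := by unfold Pre_minimumAddedInteger; infer_instance

def pvWitness_minimumAddedInteger : List Int × List Int := ([4, 20, 16], [14])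

def Spec_minimumAddedInteger (nums1 : List Int) (nums2 : List Int) (out : Int) : Prop := out = minimumAddedInteger_alt nums1 nums2
instance (nums1 : List Int) (nums2 : List Int) (out : Int) : Decidable (Spec_minimumAddedInteger nums1 nums2 out) := by unfold Spec_minimumAddedInteger; infer_instance

-- ===== CLAIM (what is proved, stated in full; the proofs are below) =====
def Claim_equal_minimumAddedInteger : Prop := ∀ (nums1 : List Int) (nums2 : List Int), Dom_minimumAddedInteger nums1 nums2 → Pre_minimumAddedInteger nums1 nums2 → Spec_minimumAddedInteger nums1 nums2 (minimumAddedInteger nums1 nums2)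

-- ===== LEMMAS AND PROOFS =====

-- A's greedy inner loop decides "s2.drop j is a subsequence of x + tail".
theorem aMatch_iff_sublist (x : Int) (s2 : List Int) :
    ∀ (tail : List Int) (j : Nat), j < s2.length →
      (aMatch x s2 tail j = true ↔ (s2.drop j).Sublist (tail.map (fun v => x + v))) := by
  intro tail
  induction tail with
  | nil =>
    intro j hj
    simp [aMatch, List.drop_eq_nil_iff]
    omega
  | cons v rest ih =>
    intro j hj
    have hdrop : s2.drop j = s2[j] :: s2.drop (j + 1) := List.drop_eq_getElem_cons hj
    have hget : PySem.List.pyGetD s2 (j : Int) 0 = s2[j] := by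
      simp [PySem.List.pyGetD_natCast, List.getD_eq_getElem?_getD, hj]
    rw [aMatch, hget]
    by_cases hv : s2[j] = x + v
    · simp only [hv, if_true]
      by_cases hlast : j + 1 = s2.length
      · simp only [if_pos hlast, List.map_cons, hdrop, hv]
        have : s2.drop (j + 1) = [] := by
          rw [List.drop_eq_nil_iff]; omega
        simp [this]
      · simp only [if_neg hlast, List.map_cons, hdrop, hv]
        rw [List.cons_sublist_cons]
        exact ih (j + 1) (by omega)
    · simp only [if_neg hv, List.map_cons, hdrop]
      rw [ih j hj]
      constructor
      · intro h
        rw [← hdrop]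
        exact h.cons _
      · intro h
        rcases List.sublist_cons_iff.mp h with h' | ⟨r, hr, _⟩
        · rw [hdrop]; exact h'
        · injection hr with heq _
          exact absurd heq hv

-- a :: l is a sub-multiset of pool iff a occurs and l fits in pool minus one a
theorem cons_subperm_iff_erase (a : Int) (l pool : List Int) :
    (a :: l).Subperm pool ↔ a ∈ pool ∧ l.Subperm (pool.erase a) := by
  rw [← Multiset.coe_le, ← Multiset.coe_le, ← Multiset.coe_erase]
  constructor
  · intro h
    have ha : a ∈ (pool : Multiset Int) := Multiset.mem_of_le h (by simp)
    have hc : a ::ₘ (pool : Multiset Int).erase a = (pool : Multiset Int) :=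
      Multiset.cons_erase ha
    refine ⟨by simpa using ha, ?_⟩
    rw [← hc] at h
    exact (Multiset.cons_le_cons_iff a).1 (by simpa using h)
  · rintro ⟨ha, h⟩
    have hc : a ::ₘ (pool : Multiset Int).erase a = (pool : Multiset Int) :=
      Multiset.cons_erase (by simpa using ha)
    rw [← hc]
    simpa using Multiset.cons_le_cons a h

-- B's destructive removal loop decides "the shifted s2 is a sub-multiset of pool".
theorem bFits_iff_subperm (x : Int) :
    ∀ (s2 pool : List Int),
      (bFits x s2 pool = true ↔ (s2.map (fun v => v - x)).Subperm pool) := by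
  intro s2
  induction s2 with
  | nil => intro pool; simp [bFits]
  | cons v rest ih =>
    intro pool
    rw [bFits, List.map_cons, cons_subperm_iff_erase]
    by_cases hmem : v - x ∈ pool
    · rw [PySem.List.remove?_eq_some_erase pool (v - x) hmem]
      simp [ih, hmem]
    · rw [(PySem.List.remove?_eq_none_iff pool (v - x)).mpr hmem]
      simp [hmem]

-- shifting by x turns the sub-multiset test into one against x + tail
theorem subperm_shift (x : Int) (s2 tail : List Int) :
    (s2.map (fun v => v - x)).Subperm tail ↔ s2.Subperm (tail.map (fun v => x + v)) := by
  have hinj₁ : Function.Injective (fun v : Int => x + v) := fun a b h => by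
    simpa using h
  have hinj₂ : Function.Injective (fun v : Int => v - x) := fun a b h => by
    simpa using h
  constructor
  · intro h
    have := h.map (f := fun v : Int => x + v) hinj₁
    simpa [List.map_map, Function.comp_def] using this
  · intro h
    have := h.map (f := fun v : Int => v - x) hinj₂
    simpa [List.map_map, Function.comp_def] using this

-- on sorted lists, sub-multiset containment and subsequence coincide
theorem subperm_iff_sublist_of_sorted {l₁ l₂ : List Int}
    (h₁ : l₁.Pairwise (· ≤ ·)) (h₂ : l₂.Pairwise (· ≤ ·)) :
    l₁.Subperm l₂ ↔ l₁.Sublist l₂ := by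
  constructor
  · intro h
    exact List.sublist_of_subperm_of_pairwise h h₁ h₂
  · exact List.Sublist.subperm

-- the two guards coincide on a nonempty sorted s2 and sorted tail
theorem check_eq (x : Int) (s2 tail : List Int) (hs2 : s2 ≠ [])
    (h2 : s2.Pairwise (· ≤ ·)) (ht : tail.Pairwise (· ≤ ·)) :
    aMatch x s2 tail 0 = bFits x s2 tail := by
  have hlen : 0 < s2.length := List.length_pos_of_ne_nil hs2
  have hmap : (tail.map (fun v => x + v)).Pairwise (· ≤ ·) :=
    ht.map _ (fun a b h => by omega)
  rw [Bool.eq_iff_iff, aMatch_iff_sublist x s2 tail 0 hlen, List.drop_zero,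
    bFits_iff_subperm, subperm_shift,
    subperm_iff_sublist_of_sorted h2 hmap]

-- ===== VERDICT (by name: the statement is the Claim_ definition above) =====
theorem minimumAddedInteger_spec : Claim_equal_minimumAddedInteger := by
  intro nums1 nums2 _ hpre
  unfold Spec_minimumAddedInteger minimumAddedInteger minimumAddedInteger_alt
  have hs2 : PySem.List.sorted nums2 (fun v => v) false ≠ [] := by
    rw [Ne, PySem.List.sorted_eq_nil_iff]
    exact hpre.2
  have h1 : (PySem.List.sorted nums1 (fun v => v) false).Pairwise (· ≤ ·) :=
    PySem.List.sorted_pairwise nums1 (fun v => v) |>.imp (fun h => h)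
  have h2 : (PySem.List.sorted nums2 (fun v => v) false).Pairwise (· ≤ ·) :=
    PySem.List.sorted_pairwise nums2 (fun v => v) |>.imp (fun h => h)
  simp only [aTry]
  rw [check_eq _ _ _ hs2 h2 (h1.sublist (List.drop_sublist 2 _)),
      check_eq _ _ _ hs2 h2 (h1.sublist (List.drop_sublist 1 _))]
  norm_num
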